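-- pv_equiv track=rewrite | github.com/Malik8122/NurseGuard | backend/engine/nsga2.py | _nsga2_sort
-- ===== SOURCE A (Python) =====
-- def _dominates(a: tuple, b: tuple) -> bool:
--     return all(x <= y for x, y in zip(a, b)) and any(x < y for x, y in zip(a, b))
--
-- def _nsga2_sort(objectives: list) -> list:
--     n    = len(objectives)
--     rank = [0] * n
--     dc   = [0] * n
--     db   = [[] for _ in range(n)]
--     for i in range(n):
--         for j in range(n):
--             if i == j:
--                 continue
--             if _dominates(objectives[i], objectives[j]):
--                 db[i].append(j)
--             elif _dominates(objectives[j], objectives[i]):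
--                 dc[i] += 1
--         if dc[i] == 0:
--             rank[i] = 0
--     fronts = [[i for i in range(n) if dc[i] == 0]]
--     f = 0
--     while fronts[f]:
--         nxt = []
--         for i in fronts[f]:
--             for j in db[i]:
--                 dc[j] -= 1
--                 if dc[j] == 0:
--                     rank[j] = f + 1
--                     nxt.append(j)
--         fronts.append(nxt)
--         f += 1
--     return rank
-- ===== SOURCE B (Python) =====
-- def _dominates(a: tuple, b: tuple) -> bool:
--     return all(x <= y for x, y in zip(a, b)) and any(x < y for x, y in zip(a, b))
--
-- def _nsga2_sort(objectives: list) -> list: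
--     # repeated-scan front peeling: no domination-count / dominated-set tables
--     n = len(objectives)
--     rank = [0] * n
--     remaining = list(range(n))
--     for f in range(n):
--         front = [i for i in remaining
--                  if not any(_dominates(objectives[j], objectives[i]) for j in remaining)]
--         for i in front:
--             rank[i] = f
--         remaining = [i for i in remaining if i not in front]
--         if not remaining:
--             break
--     return rank
-- ===== Notes on version B (the rewrite author's own statement) =====
-- stated objective: simpler
-- what changed: Replaces A's domination-count and dominated-set table bookkeeping (build dc/db, then propagate decrements front by front) with the classic repeated-scan front peeling: keep a list of unranked indices and repeatedly extract the points no remaining point dominates.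
import Mathlib
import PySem

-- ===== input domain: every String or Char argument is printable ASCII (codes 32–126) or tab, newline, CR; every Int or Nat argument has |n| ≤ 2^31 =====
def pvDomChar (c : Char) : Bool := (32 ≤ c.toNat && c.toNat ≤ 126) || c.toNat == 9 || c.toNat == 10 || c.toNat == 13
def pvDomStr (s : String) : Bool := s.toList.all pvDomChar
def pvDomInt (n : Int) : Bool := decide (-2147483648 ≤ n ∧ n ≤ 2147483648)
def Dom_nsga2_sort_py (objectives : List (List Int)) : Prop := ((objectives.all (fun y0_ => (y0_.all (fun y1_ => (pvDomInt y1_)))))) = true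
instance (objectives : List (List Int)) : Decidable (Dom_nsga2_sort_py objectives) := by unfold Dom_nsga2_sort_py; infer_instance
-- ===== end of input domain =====

-- B replaces A's domination-count/dominated-set bookkeeping by repeated-scan front peeling (simpler, no speed claim).

-- ===== PORT A =====
-- _dominates (shared by both Python files)
def pyDominates (a b : List Int) : Bool :=
  ((a.zip b).all (fun p => decide (p.1 ≤ p.2))) && ((a.zip b).any (fun p => decide (p.1 < p.2)))

-- inner j-loop of A: builds (db[i], dc[i])
def nsga2InnerA (objectives : List (List Int)) (n i : Nat) : List Nat × Int :=
  (List.range n).foldl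
    (fun s j =>
      if j = i then s
      else if pyDominates (objectives.getD i []) (objectives.getD j []) then (s.1 ++ [j], s.2)
      else if pyDominates (objectives.getD j []) (objectives.getD i []) then (s.1, s.2 + 1)
      else s)
    ([], 0)

-- body of 'for j in db[i]': dc[j] -= 1; if dc[j] == 0: rank[j] = f+1; nxt.append(j)
def nsga2StepA (f : Nat) (s : List Int × List Int × List Nat) (j : Nat) : List Int × List Int × List Nat :=
  let dc' := s.1.set j (s.1.getD j 0 - 1)
  if dc'.getD j 0 == 0 then (dc', s.2.1.set j ((f : Int) + 1), s.2.2 ++ [j])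
  else (dc', s.2.1, s.2.2)

-- the 'while fronts[f]' loop; fuel n+1 always suffices (each nonempty front removes fresh indices)
def nsga2WhileA (tbl : List (List Nat × Int)) : Nat → List Nat → List Int → List Int → Nat → List Int
  | 0, _, _, rank, _ => rank
  | fuel + 1, front, dc, rank, f =>
    if front.isEmpty then rank
    else
      let s := front.foldl (fun s i => ((tbl.getD i ([], 0)).1).foldl (nsga2StepA f) s) (dc, rank, [])
      nsga2WhileA tbl fuel s.2.2 s.1 s.2.1 (f + 1)

def nsga2_sort_py (objectives : List (List Int)) : List Int :=
  let n := objectives.length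
  let tbl := (List.range n).map (fun i => nsga2InnerA objectives n i)
  -- 'if dc[i] == 0: rank[i] = 0' of the i-loop (a rewrite of 0 over 0)
  let rank0 := (List.range n).foldl
    (fun r i => if (tbl.getD i ([], 0)).2 == 0 then r.set i 0 else r) (List.replicate n (0 : Int))
  let fronts0 := (List.range n).filter (fun i => (tbl.getD i ([], 0)).2 == 0)
  nsga2WhileA tbl (n + 1) fronts0 (tbl.map Prod.snd) rank0 0

-- ===== PORT B =====
-- 'for f in range(n): …; if not remaining: break' of Source B
def nsga2GoB (objectives : List (List Int)) : Nat → List Nat → List Int → Nat → List Int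
  | 0, _, rank, _ => rank
  | fuel + 1, remaining, rank, f =>
    let front := remaining.filter
      (fun i => !(remaining.any (fun j => pyDominates (objectives.getD j []) (objectives.getD i []))))
    let rank := front.foldl (fun r i => r.set i (f : Int)) rank
    let remaining := remaining.filter (fun i => !(front.contains i))
    if remaining.isEmpty then rank else nsga2GoB objectives fuel remaining rank (f + 1)

def nsga2_sort_py_alt (objectives : List (List Int)) : List Int :=
  let n := objectives.length
  nsga2GoB objectives n (List.range n) (List.replicate n (0 : Int)) 0

-- ===== PRECONDITION & SPEC =====
def Spec_nsga2_sort_py (objectives : List (List Int)) (out : List Int) : Prop := out = nsga2_sort_py_alt objectives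
instance (objectives : List (List Int)) (out : List Int) : Decidable (Spec_nsga2_sort_py objectives out) := by unfold Spec_nsga2_sort_py; infer_instance

-- ===== CLAIM (what is proved, stated in full; the proofs are below) =====
def Claim_equal_nsga2_sort_py : Prop := ∀ (objectives : List (List Int)), Dom_nsga2_sort_py objectives → Spec_nsga2_sort_py objectives (nsga2_sort_py objectives)

-- ===== LEMMAS AND PROOFS =====

-- objectives[i] as Python reads it (in-range everywhere we use it)
def obAt (objectives : List (List Int)) (i : Nat) : List Int := objectives.getD i []
-- "i dominates j"
def domB (objectives : List (List Int)) (i j : Nat) : Bool := pyDominates (obAt objectives i) (obAt objectives j)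
-- number of dominators of j inside the list R
def domCnt (objectives : List (List Int)) (R : List Nat) (j : Nat) : Nat :=
  (R.filter (fun i => domB objectives i j)).length

lemma zip_self_any_lt (a : List Int) : (a.zip a).any (fun p => decide (p.1 < p.2)) = false := by
  induction a with
  | nil => simp
  | cons x t ih => simp [List.zip_cons_cons, ih]

lemma pyDominates_irrefl (a : List Int) : pyDominates a a = false := by
  simp [pyDominates, zip_self_any_lt]

lemma pyDominates_antisymm {a b : List Int} (h : pyDominates a b = true) : pyDominates b a = false := by
  unfold pyDominates at *
  rw [Bool.and_eq_true] at h
  obtain ⟨hall, -⟩ := h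
  rw [Bool.eq_false_iff]
  intro hcon
  rw [Bool.and_eq_true, List.any_eq_true] at hcon
  obtain ⟨-, p, hp, hlt⟩ := hcon
  obtain ⟨k, hk, hpk⟩ := List.getElem_of_mem hp
  rw [List.all_eq_true] at hall
  have hk2 : k < (a.zip b).length := by
    simp only [List.length_zip] at hk ⊢; omega
  have h2 := hall ((a.zip b)[k]) (List.getElem_mem hk2)
  rw [List.getElem_zip] at h2
  rw [List.getElem_zip] at hpk
  subst hpk
  simp only [decide_eq_true_eq] at h2 hlt
  omega

lemma pyDominates_nil (a : List Int) : pyDominates a [] = false := by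
  simp [pyDominates]

lemma domB_lt {objectives : List (List Int)} {i j : Nat}
    (h : domB objectives i j = true) : j < objectives.length := by
  by_contra hge
  have hj : objectives.getD j [] = [] := List.getD_eq_default _ _ (by omega)
  rw [domB, obAt, obAt, hj, pyDominates_nil] at h
  exact absurd h (by simp)

lemma getD_set_self {l : List Int} {i : Nat} {v : Int} (h : i < l.length) :
    (l.set i v).getD i 0 = v := by
  rw [List.getD_eq_getElem?_getD, List.getElem?_set_self (by omega)]
  simp

lemma getD_set_ne {l : List Int} {i j : Nat} {v : Int} (h : i ≠ j) :
    (l.set i v).getD j 0 = l.getD j 0 := by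
  rw [List.getD_eq_getElem?_getD, List.getElem?_set_ne h, ← List.getD_eq_getElem?_getD]

lemma getD_set_cases {l : List Int} {i j : Nat} {v : Int} :
    (l.set i v).getD j 0 = if j = i ∧ i < l.length then v else l.getD j 0 := by
  by_cases hj : j = i
  · subst hj
    by_cases hlt : j < l.length
    · rw [if_pos ⟨rfl, hlt⟩]
      exact getD_set_self hlt
    · rw [List.set_eq_of_length_le (by omega)]
      simp [hlt]
  · rw [getD_set_ne (by omega)]
    simp [hj]

lemma list_eq_of_getD {l1 l2 : List Int} (hlen : l1.length = l2.length)
    (h : ∀ k, l1.getD k 0 = l2.getD k 0) : l1 = l2 := by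
  apply List.ext_getElem hlen
  intro k h1 h2
  have := h k
  rwa [List.getD_eq_getElem _ _ h1, List.getD_eq_getElem _ _ h2] at this

-- B's rank-assignment fold, pointwise
lemma foldl_set_len (L : List Nat) (r : List Int) (v : Int) :
    (L.foldl (fun r i => r.set i v) r).length = r.length := by
  induction L generalizing r with
  | nil => rfl
  | cons j t ih => simp [List.foldl_cons, ih]

lemma foldl_set_getD (L : List Nat) (r : List Int) (v : Int) (k : Nat)
    (hL : ∀ j ∈ L, j < r.length) :
    (L.foldl (fun r i => r.set i v) r).getD k 0 = if k ∈ L then v else r.getD k 0 := by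
  induction L generalizing r with
  | nil => simp
  | cons j t ih =>
    rw [List.foldl_cons, ih _ (fun x hx => by rw [List.length_set]; exact hL x (by simp [hx]))]
    by_cases hk : k ∈ t
    · simp [hk]
    · by_cases hkj : k = j
      · subst hkj
        rw [if_neg hk, if_pos (by simp)]
        exact getD_set_self (hL k (by simp))
      · rw [getD_set_ne (by omega)]
        simp [hk, hkj]

lemma innerA_fold (objectives : List (List Int)) (i : Nat) (L : List Nat) (acc : List Nat × Int) :
    L.foldl (fun s j =>
      if j = i then s
      else if pyDominates (objectives.getD i []) (objectives.getD j []) then (s.1 ++ [j], s.2)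
      else if pyDominates (objectives.getD j []) (objectives.getD i []) then (s.1, s.2 + 1)
      else s) acc
    = (acc.1 ++ L.filter (fun j => domB objectives i j),
       acc.2 + ((L.filter (fun j => domB objectives j i)).length : Int)) := by
  induction L generalizing acc with
  | nil => simp
  | cons j t ih =>
    rw [List.foldl_cons, ih]
    simp only [List.filter_cons, domB, obAt]
    by_cases hj : j = i
    · subst hj
      have h1 : pyDominates (objectives.getD j []) (objectives.getD j []) = false :=
        pyDominates_irrefl _
      simp only [h1, if_neg Bool.false_ne_true, if_true]
    · rw [if_neg hj]
      by_cases h2 : pyDominates (objectives.getD i []) (objectives.getD j []) = true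
      · have h3 : pyDominates (objectives.getD j []) (objectives.getD i []) = false :=
          pyDominates_antisymm h2
        simp only [h2, h3, if_neg Bool.false_ne_true]
        simp
      · simp only [Bool.not_eq_true] at h2
        rw [if_neg (by simp only [h2]; exact Bool.false_ne_true)]
        by_cases h3 : pyDominates (objectives.getD j []) (objectives.getD i []) = true
        · simp only [h2, h3, if_true, if_neg Bool.false_ne_true, List.length_cons]
          rw [Prod.mk.injEq]
          refine ⟨by simp, ?_⟩
          push_cast
          ring
        · simp only [Bool.not_eq_true] at h3
          simp only [h2, h3, if_neg Bool.false_ne_true]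

lemma innerA_spec (objectives : List (List Int)) (n i : Nat) :
    nsga2InnerA objectives n i =
      ((List.range n).filter (fun j => domB objectives i j),
       (domCnt objectives (List.range n) i : Int)) := by
  rw [nsga2InnerA, innerA_fold]
  simp [domCnt]

lemma getD_replicate_zero (n k : Nat) : (List.replicate n (0 : Int)).getD k 0 = 0 := by
  rw [List.getD_eq_getElem?_getD, List.getElem?_replicate]
  split <;> rfl

lemma foldl_condset_len (c : Nat → Bool) (L : List Nat) (r : List Int) :
    (L.foldl (fun r i => if c i then r.set i 0 else r) r).length = r.length := by
  induction L generalizing r with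
  | nil => rfl
  | cons j t ih =>
    rw [List.foldl_cons]
    split <;> simp [ih]

lemma foldl_condset_zero (c : Nat → Bool) (L : List Nat) (r : List Int)
    (h : ∀ k, r.getD k 0 = 0) (k : Nat) :
    (L.foldl (fun r i => if c i then r.set i 0 else r) r).getD k 0 = 0 := by
  induction L generalizing r with
  | nil => exact h k
  | cons j t ih =>
    rw [List.foldl_cons]
    split
    · refine ih _ (fun k' => ?_)
      rw [getD_set_cases]
      split
      · rfl
      · exact h k'
    · exact ih _ h

lemma stepA_fold (f : Nat) (L : List Nat) (dc rank : List Int) (nxt : List Nat)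
    (hnd : L.Nodup) (hdcL : ∀ j ∈ L, j < dc.length) (hrkL : ∀ j ∈ L, j < rank.length) :
    (L.foldl (nsga2StepA f) (dc, rank, nxt)).1.length = dc.length ∧
    (L.foldl (nsga2StepA f) (dc, rank, nxt)).2.1.length = rank.length ∧
    (∀ k, (L.foldl (nsga2StepA f) (dc, rank, nxt)).1.getD k 0 =
      if k ∈ L then dc.getD k 0 - 1 else dc.getD k 0) ∧
    (∀ k, (L.foldl (nsga2StepA f) (dc, rank, nxt)).2.1.getD k 0 =
      if k ∈ L ∧ dc.getD k 0 = 1 then (f : Int) + 1 else rank.getD k 0) ∧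
    (L.foldl (nsga2StepA f) (dc, rank, nxt)).2.2 =
      nxt ++ L.filter (fun j => dc.getD j 0 == 1) := by
  induction L generalizing dc rank nxt with
  | nil => simp
  | cons j t ih =>
    have hjdc : j < dc.length := hdcL j (by simp)
    have hjrk : j < rank.length := hrkL j (by simp)
    have hjt : j ∉ t := (List.nodup_cons.mp hnd).1
    rw [List.foldl_cons]
    have hstep : nsga2StepA f (dc, rank, nxt) j =
        if dc.getD j 0 = 1 then
          (dc.set j (dc.getD j 0 - 1), rank.set j ((f : Int) + 1), nxt ++ [j])
        else (dc.set j (dc.getD j 0 - 1), rank, nxt) := by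
      rw [nsga2StepA]
      simp only [getD_set_self hjdc, beq_iff_eq]
      by_cases hz : dc.getD j 0 = 1
      · rw [if_pos (by omega), if_pos hz]
      · rw [if_neg (by omega), if_neg hz]
    rw [hstep]
    have hbnd1 : ∀ x ∈ t, x < (dc.set j (dc.getD j 0 - 1)).length := by
      intro x hx; rw [List.length_set]; exact hdcL x (by simp [hx])
    by_cases hz : dc.getD j 0 = 1
    · rw [if_pos hz]
      obtain ⟨c1, c2, c3, c4, c5⟩ := ih (dc.set j (dc.getD j 0 - 1)) (rank.set j ((f : Int) + 1))
        (nxt ++ [j]) (List.nodup_cons.mp hnd).2 hbnd1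
        (fun x hx => by rw [List.length_set]; exact hrkL x (by simp [hx]))
      refine ⟨by rw [c1, List.length_set], by rw [c2, List.length_set], ?_, ?_, ?_⟩
      · intro k
        rw [c3 k]
        by_cases hk : k = j
        · subst hk
          rw [if_neg hjt, getD_set_self hjdc, if_pos (by simp)]
        · rw [getD_set_ne (by omega)]
          by_cases hkt : k ∈ t
          · rw [if_pos hkt, if_pos (List.mem_cons_of_mem _ hkt)]
          · rw [if_neg hkt, if_neg (fun h => by
              rcases List.mem_cons.mp h with h1 | h1
              · exact hk h1
              · exact hkt h1)]
      · intro k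
        rw [c4 k]
        by_cases hk : k = j
        · subst hk
          rw [if_neg (by simp [hjt]), getD_set_self hjrk, if_pos ⟨by simp, hz⟩]
        · rw [getD_set_ne (fun h => hk h.symm), getD_set_ne (fun h => hk h.symm)]
          by_cases hkt : k ∈ t ∧ dc.getD k 0 = 1
          · rw [if_pos hkt, if_pos ⟨by simp [hkt.1], hkt.2⟩]
          · rw [if_neg hkt, if_neg (by
              rintro ⟨hm, hd⟩
              rcases List.mem_cons.mp hm with h | h
              · exact hk h
              · exact hkt ⟨h, hd⟩)]
      · rw [c5, List.filter_cons, if_pos (by simpa using hz), List.append_assoc,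
          List.singleton_append]
        have hfc : List.filter (fun x => (dc.set j (dc.getD j 0 - 1)).getD x 0 == 1) t
            = List.filter (fun x => dc.getD x 0 == 1) t :=
          List.filter_congr (fun x hx => by
            rw [getD_set_ne (fun h => hjt (by rw [h]; exact hx))])
        rw [hfc]
    · rw [if_neg hz]
      obtain ⟨c1, c2, c3, c4, c5⟩ := ih (dc.set j (dc.getD j 0 - 1)) rank nxt
        (List.nodup_cons.mp hnd).2 hbnd1 (fun x hx => hrkL x (by simp [hx]))
      refine ⟨by rw [c1, List.length_set], c2, ?_, ?_, ?_⟩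
      · intro k
        rw [c3 k]
        by_cases hk : k = j
        · subst hk
          rw [if_neg hjt, getD_set_self hjdc, if_pos (by simp)]
        · rw [getD_set_ne (by omega)]
          by_cases hkt : k ∈ t
          · rw [if_pos hkt, if_pos (List.mem_cons_of_mem _ hkt)]
          · rw [if_neg hkt, if_neg (fun h => by
              rcases List.mem_cons.mp h with h1 | h1
              · exact hk h1
              · exact hkt h1)]
      · intro k
        rw [c4 k]
        by_cases hk : k = j
        · subst hk
          rw [if_neg (by simp [hjt]), if_neg (by
              rintro ⟨-, hd⟩
              exact hz hd)]
        · rw [getD_set_ne (fun h => hk h.symm)]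
          by_cases hkt : k ∈ t ∧ dc.getD k 0 = 1
          · rw [if_pos hkt, if_pos ⟨by simp [hkt.1], hkt.2⟩]
          · rw [if_neg hkt, if_neg (by
              rintro ⟨hm, hd⟩
              rcases List.mem_cons.mp hm with h | h
              · exact hk h
              · exact hkt ⟨h, hd⟩)]
      · rw [c5, List.filter_cons, if_neg (by simpa using hz)]
        have hfc : List.filter (fun x => (dc.set j (dc.getD j 0 - 1)).getD x 0 == 1) t
            = List.filter (fun x => dc.getD x 0 == 1) t :=
          List.filter_congr (fun x hx => by
            rw [getD_set_ne (fun h => hjt (by rw [h]; exact hx))])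
        rw [hfc]

lemma domCnt_cons (objectives : List (List Int)) (i : Nat) (t : List Nat) (k : Nat) :
    domCnt objectives (i :: t) k
      = (if domB objectives i k then 1 else 0) + domCnt objectives t k := by
  rw [domCnt, domCnt, List.filter_cons]
  by_cases h : domB objectives i k = true
  · rw [if_pos h, if_pos h, List.length_cons]
    omega
  · rw [if_neg h, if_neg h]
    omega

lemma mem_dbi {objectives : List (List Int)} {i k : Nat} :
    k ∈ (List.range objectives.length).filter (fun j => domB objectives i j)
      ↔ domB objectives i k = true := by
  rw [List.mem_filter, List.mem_range]
  exact ⟨fun h => h.2, fun h => ⟨domB_lt h, h⟩⟩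

lemma stageA_fold (objectives : List (List Int)) (tbl : List (List Nat × Int)) (f : Nat)
    (P : List Nat) (dc rank : List Int) (nxt : List Nat)
    (hdc : dc.length = objectives.length) (hrk : rank.length = objectives.length)
    (htbl : ∀ i ∈ P, (tbl.getD i ([], 0)).1
      = (List.range objectives.length).filter (fun j => domB objectives i j))
    (hnxtnd : nxt.Nodup) (hnxt : ∀ j ∈ nxt, dc.getD j 0 ≤ 0) :
    ∀ res, res = P.foldl (fun s i => ((tbl.getD i ([], 0)).1).foldl (nsga2StepA f) s) (dc, rank, nxt) →
      res.1.length = objectives.length ∧ res.2.1.length = objectives.length ∧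
      (∀ k, res.1.getD k 0 = dc.getD k 0 - (domCnt objectives P k : Int)) ∧
      (∀ k, res.2.1.getD k 0 =
        if 1 ≤ dc.getD k 0 ∧ dc.getD k 0 ≤ (domCnt objectives P k : Int) then (f : Int) + 1
        else rank.getD k 0) ∧
      res.2.2.Nodup ∧
      (∀ j, j ∈ res.2.2 ↔ (j ∈ nxt ∨ (1 ≤ dc.getD j 0 ∧ dc.getD j 0 ≤ (domCnt objectives P j : Int)))) := by
  induction P generalizing dc rank nxt with
  | nil =>
    rintro res rfl
    simp only [List.foldl_nil]
    have h0 : ∀ k, (domCnt objectives [] k : Int) = 0 := fun k => rfl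
    refine ⟨hdc, hrk, fun k => by rw [h0]; omega, fun k => ?_, hnxtnd, fun j => ?_⟩
    · rw [if_neg (by rw [h0]; omega)]
    · rw [h0]
      constructor
      · exact fun h => Or.inl h
      · rintro (h | h)
        · exact h
        · omega
  | cons i rest ih =>
    rintro res rfl
    rw [List.foldl_cons, htbl i (by simp)]
    obtain ⟨c1, c2, c3, c4, c5⟩ := stepA_fold f
      ((List.range objectives.length).filter (fun j => domB objectives i j)) dc rank nxt
      ((List.nodup_range).filter _)
      (fun j hj => by rw [hdc]; exact List.mem_range.mp (List.mem_of_mem_filter hj))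
      (fun j hj => by rw [hrk]; exact List.mem_range.mp (List.mem_of_mem_filter hj))
    set dbi := (List.range objectives.length).filter (fun j => domB objectives i j) with hdbi
    set s1 := dbi.foldl (nsga2StepA f) (dc, rank, nxt) with hs1
    have hmem : ∀ k, k ∈ dbi ↔ domB objectives i k = true := fun k => mem_dbi
    have hdc1 : ∀ k, s1.1.getD k 0
        = dc.getD k 0 - (if domB objectives i k then 1 else 0) := by
      intro k
      rw [c3 k]
      by_cases hd : domB objectives i k = true
      · rw [if_pos ((hmem k).mpr hd), if_pos hd]
      · rw [if_neg (fun hc => hd ((hmem k).mp hc)), if_neg hd]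
        omega
    have hrk1 : ∀ k, s1.2.1.getD k 0
        = if (domB objectives i k ∧ dc.getD k 0 = 1) then (f : Int) + 1 else rank.getD k 0 := by
      intro k
      rw [c4 k]
      by_cases hd : domB objectives i k = true
      · by_cases hz : dc.getD k 0 = 1
        · rw [if_pos ⟨(hmem k).mpr hd, hz⟩, if_pos ⟨hd, hz⟩]
        · rw [if_neg (fun h => hz h.2), if_neg (fun h => hz h.2)]
      · rw [if_neg (fun h => hd ((hmem k).mp h.1)), if_neg (fun h => hd h.1)]
    have hnxt1mem : ∀ j, j ∈ s1.2.2 ↔ (j ∈ nxt ∨ (domB objectives i j = true ∧ dc.getD j 0 = 1)) := by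
      intro j
      rw [c5, List.mem_append, List.mem_filter]
      constructor
      · rintro (h | ⟨h1, h2⟩)
        · exact Or.inl h
        · exact Or.inr ⟨(hmem j).mp h1, by simpa using h2⟩
      · rintro (h | ⟨h1, h2⟩)
        · exact Or.inl h
        · exact Or.inr ⟨(hmem j).mpr h1, by simpa using h2⟩
    have hnd1 : s1.2.2.Nodup := by
      rw [c5]
      refine List.Nodup.append hnxtnd (List.Nodup.filter _ ((List.nodup_range).filter _)) ?_
      intro j hj1 hj2
      have := hnxt j hj1
      have h2 := List.of_mem_filter hj2
      simp only [beq_iff_eq] at h2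
      omega
    have hle1 : ∀ j ∈ s1.2.2, s1.1.getD j 0 ≤ 0 := by
      intro j hj
      rcases (hnxt1mem j).mp hj with h | ⟨h1, h2⟩
      · rw [hdc1 j]
        have := hnxt j h
        split <;> omega
      · rw [hdc1 j, if_pos h1]
        omega
    obtain ⟨d1, d2, d3, d4, d5, d6⟩ := ih s1.1 s1.2.1 s1.2.2
      (by rw [c1, hdc]) (by rw [c2, hrk]) (fun x hx => htbl x (by simp [hx])) hnd1 hle1
      _ rfl
    refine ⟨d1, d2, fun k => ?_, fun k => ?_, d5, fun j => ?_⟩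
    · rw [d3 k, hdc1 k, domCnt_cons]
      by_cases hd : domB objectives i k = true
      · rw [if_pos hd, if_pos hd]
        push_cast
        omega
      · rw [if_neg hd, if_neg hd]
        push_cast
        omega
    · by_cases hd : domB objectives i k = true
      · have e1 : s1.2.1.getD k 0 = if dc.getD k 0 = 1 then (f : Int) + 1 else rank.getD k 0 := by
          rw [hrk1 k]
          by_cases hz : dc.getD k 0 = 1
          · rw [if_pos ⟨hd, hz⟩, if_pos hz]
          · rw [if_neg (fun h => hz h.2), if_neg hz]
        rw [d4 k, hdc1 k, e1, domCnt_cons, if_pos hd, if_pos hd]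
        split_ifs <;> first | rfl | (push_cast at *; omega)
      · have e1 : s1.2.1.getD k 0 = rank.getD k 0 := by
          rw [hrk1 k, if_neg (fun h => hd h.1)]
        rw [d4 k, hdc1 k, e1, domCnt_cons, if_neg hd, if_neg hd]
        split_ifs <;> first | rfl | (push_cast at *; omega)
    · rw [d6 j, hnxt1mem j, hdc1 j, domCnt_cons]
      by_cases hd : domB objectives i j = true
      · rw [if_pos hd, if_pos hd]
        constructor
        · rintro ((h | h) | h)
          · exact Or.inl h
          · exact Or.inr (by push_cast; omega)
          · exact Or.inr (by push_cast at h ⊢; omega)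
        · rintro (h | h)
          · exact Or.inl (Or.inl h)
          · by_cases hz : dc.getD j 0 = 1
            · exact Or.inl (Or.inr ⟨hd, hz⟩)
            · exact Or.inr (by push_cast at h ⊢; omega)
      · rw [if_neg hd, if_neg hd]
        constructor
        · rintro ((h | h) | h)
          · exact Or.inl h
          · exact absurd h.1 hd
          · exact Or.inr (by push_cast at h ⊢; omega)
        · rintro (h | h)
          · exact Or.inl (Or.inl h)
          · exact Or.inr (by push_cast at h ⊢; omega)

lemma domCnt_pos_exists {objectives : List (List Int)} {P : List Nat} {k : Nat}
    (h : 1 ≤ domCnt objectives P k) : ∃ i ∈ P, domB objectives i k = true := by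
  rw [domCnt] at h
  have hne : (P.filter (fun i => domB objectives i k)) ≠ [] := by
    intro hnil; rw [hnil] at h; exact absurd h (by simp)
  obtain ⟨i, hi⟩ := List.exists_mem_of_ne_nil _ hne
  exact ⟨i, List.mem_of_mem_filter hi, (List.mem_filter.mp hi).2⟩

lemma domCnt_pos_of_mem {objectives : List (List Int)} {P : List Nat} {i k : Nat}
    (hi : i ∈ P) (hd : domB objectives i k = true) : 1 ≤ domCnt objectives P k := by
  rw [domCnt]
  have : i ∈ P.filter (fun i => domB objectives i k) := List.mem_filter.mpr ⟨hi, hd⟩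
  cases hmem : P.filter (fun i => domB objectives i k) with
  | nil => rw [hmem] at this; exact absurd this (by simp)
  | cons a t => simp

lemma count_split (objectives : List (List Int)) (R F : List Nat)
    (hRnd : R.Nodup) (hFnd : F.Nodup) (hFR : ∀ x ∈ F, x ∈ R) (j : Nat) :
    domCnt objectives R j
      = domCnt objectives F j + domCnt objectives (R.filter (fun x => !(F.contains x))) j := by
  have hnd2 : (F ++ R.filter (fun x => !(F.contains x))).Nodup := by
    refine List.Nodup.append hFnd (hRnd.filter _) ?_
    intro x hx1 hx2
    have := List.of_mem_filter hx2
    simp only [Bool.not_eq_true'] at this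
    simp at this
    exact this hx1
  have hperm : R.Perm (F ++ R.filter (fun x => !(F.contains x))) := by
    rw [List.perm_ext_iff_of_nodup hRnd hnd2]
    intro a
    constructor
    · intro ha
      by_cases haf : a ∈ F
      · exact List.mem_append.mpr (Or.inl haf)
      · refine List.mem_append.mpr (Or.inr (List.mem_filter.mpr ⟨ha, ?_⟩))
        simp [haf]
    · intro ha
      rcases List.mem_append.mp ha with h | h
      · exact hFR a h
      · exact List.mem_of_mem_filter h
  rw [domCnt, domCnt, domCnt, (hperm.filter _).length_eq, List.filter_append,
    List.length_append]

lemma frontB_mem (objectives : List (List Int)) (R : List Nat) (i : Nat) :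
    i ∈ R.filter (fun i => !(R.any (fun j =>
        pyDominates (objectives.getD j []) (objectives.getD i []))))
      ↔ (i ∈ R ∧ domCnt objectives R i = 0) := by
  rw [List.mem_filter]
  constructor
  · rintro ⟨h1, h2⟩
    refine ⟨h1, ?_⟩
    by_contra hc
    obtain ⟨x, hx, hdx⟩ := domCnt_pos_exists (objectives := objectives) (P := R) (k := i) (by omega)
    rw [domB, obAt, obAt] at hdx
    simp only [Bool.not_eq_true', List.any_eq_false] at h2
    exact absurd hdx (by simpa using h2 x hx)
  · rintro ⟨h1, h2⟩
    refine ⟨h1, ?_⟩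
    simp only [Bool.not_eq_true', List.any_eq_false]
    intro x hx hc
    have : 1 ≤ domCnt objectives R i := domCnt_pos_of_mem hx (by rw [domB, obAt, obAt]; exact hc)
    omega

lemma goB_stuck (objectives : List (List Int)) :
    ∀ (fuel : Nat) (R : List Nat) (rank : List Int) (f : Nat),
      (∀ i ∈ R, domCnt objectives R i ≠ 0) →
      nsga2GoB objectives fuel R rank f = rank := by
  intro fuel
  induction fuel with
  | zero => intro R rank f _; rfl
  | succ fuel ih =>
    intro R rank f h
    rw [nsga2GoB]
    have hfb : R.filter (fun i => !(R.any (fun j =>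
        pyDominates (objectives.getD j []) (objectives.getD i [])))) = [] := by
      rw [List.eq_nil_iff_forall_not_mem]
      intro x hx
      obtain ⟨h1, h2⟩ := (frontB_mem objectives R x).mp hx
      exact h x h1 h2
    rw [hfb]
    simp only [List.foldl_nil, List.contains_nil, Bool.not_false, List.filter_true]
    split
    · rfl
    · exact ih R rank (f + 1) h

lemma getD_map_range {α : Type} (g : Nat → α) (d : α) {n i : Nat} (h : i < n) :
    (((List.range n).map g).getD i d) = g i := by
  rw [List.getD_eq_getElem?_getD, List.getElem?_map, List.getElem?_range h]
  simp

lemma whileA_succ (tbl : List (List Nat × Int)) (fuel : Nat) (front : List Nat)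
    (dc rank : List Int) (f : Nat) :
    nsga2WhileA tbl (fuel + 1) front dc rank f =
      if front.isEmpty then rank
      else nsga2WhileA tbl fuel
        (front.foldl (fun s i => ((tbl.getD i ([], 0)).1).foldl (nsga2StepA f) s) (dc, rank, [])).2.2
        (front.foldl (fun s i => ((tbl.getD i ([], 0)).1).foldl (nsga2StepA f) s) (dc, rank, [])).1
        (front.foldl (fun s i => ((tbl.getD i ([], 0)).1).foldl (nsga2StepA f) s) (dc, rank, [])).2.1
        (f + 1) := rfl

lemma goB_succ (objectives : List (List Int)) (fuel : Nat) (remaining : List Nat)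
    (rank : List Int) (f : Nat) :
    nsga2GoB objectives (fuel + 1) remaining rank f =
      if (remaining.filter (fun i => !((remaining.filter (fun i => !(remaining.any (fun j =>
            pyDominates (objectives.getD j []) (objectives.getD i []))))).contains i))).isEmpty then
        ((remaining.filter (fun i => !(remaining.any (fun j =>
          pyDominates (objectives.getD j []) (objectives.getD i []))))).foldl
            (fun r i => r.set i (f : Int)) rank)
      else nsga2GoB objectives fuel
        (remaining.filter (fun i => !((remaining.filter (fun i => !(remaining.any (fun j =>
          pyDominates (objectives.getD j []) (objectives.getD i []))))).contains i)))
        ((remaining.filter (fun i => !(remaining.any (fun j =>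
          pyDominates (objectives.getD j []) (objectives.getD i []))))).foldl
            (fun r i => r.set i (f : Int)) rank)
        (f + 1) := rfl

lemma loop_eq (objectives : List (List Int)) (tbl : List (List Nat × Int))
    (htbl : ∀ i, i < objectives.length → (tbl.getD i ([], 0)).1
      = (List.range objectives.length).filter (fun j => domB objectives i j)) :
    ∀ (fuel : Nat) (R F : List Nat) (dc rankA rankB : List Int) (f : Nat),
      R ≠ [] → R.length ≤ fuel → R.Nodup → (∀ j ∈ R, j < objectives.length) →
      (∀ i ∈ R, ∀ j, domB objectives i j = true → j ∈ R) →
      F.Nodup → (∀ i, i ∈ F ↔ (i ∈ R ∧ domCnt objectives R i = 0)) →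
      dc.length = objectives.length → rankA.length = objectives.length →
      rankB.length = objectives.length →
      (∀ j ∈ R, dc.getD j 0 = (domCnt objectives R j : Int)) →
      (∀ k, rankA.getD k 0 = if k ∈ R ∧ domCnt objectives R k = 0 then (f : Int) else rankB.getD k 0) →
      nsga2WhileA tbl (fuel + 1) F dc rankA f = nsga2GoB objectives fuel R rankB f := by
  intro fuel
  induction fuel with
  | zero =>
    intro R F dc rankA rankB f hne hlen _ _ _ _ _ _ _ _ _ _
    cases R with
    | nil => exact absurd rfl hne
    | cons a t => simp at hlen
  | succ fuel ih =>
    intro R F dc rankA rankB f hne hlen hRnd hRlt hcl hFnd hF hdcl hral hrbl hdcInv hrel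
    rw [whileA_succ, goB_succ]
    have hfb : ∀ i, i ∈ R.filter (fun i => !(R.any (fun j =>
        pyDominates (objectives.getD j []) (objectives.getD i [])))) ↔ i ∈ F :=
      fun i => (frontB_mem objectives R i).trans (hF i).symm
    have hFR : ∀ x ∈ F, x ∈ R := fun x hx => ((hF x).mp hx).1
    by_cases hFe : F.isEmpty = true
    · -- A's front is empty: A stops; B's rescan also finds nothing and the remainder is unchanged
      rw [if_pos hFe]
      rw [List.isEmpty_iff] at hFe
      have hfbe : R.filter (fun i => !(R.any (fun j =>
          pyDominates (objectives.getD j []) (objectives.getD i [])))) = [] := by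
        rw [List.eq_nil_iff_forall_not_mem]
        intro x hx
        rw [hfb x, hFe] at hx
        exact absurd hx (by simp)
      rw [hfbe]
      simp only [List.foldl_nil, List.contains_nil, Bool.not_false, List.filter_true]
      have hstuck : ∀ i ∈ R, domCnt objectives R i ≠ 0 := by
        intro i hi hc
        have : i ∈ F := (hF i).mpr ⟨hi, hc⟩
        rw [hFe] at this
        exact absurd this (by simp)
      have hreq : rankA = rankB := by
        refine list_eq_of_getD (by rw [hral, hrbl]) (fun k => ?_)
        rw [hrel k, if_neg (fun h => hstuck k h.1 h.2)]
      rw [if_neg (fun h => hne (List.isEmpty_iff.mp h)),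
        goB_stuck objectives fuel R rankB (f + 1) hstuck]
      exact hreq
    · -- A processes front F; B peels the same front
      rw [if_neg hFe]
      have hFne : F ≠ [] := fun h => hFe (by rw [h]; rfl)
      obtain ⟨d1, d2, d3, d4, d5, d6⟩ := stageA_fold objectives tbl f F dc rankA []
        hdcl hral (fun i hi => htbl i (hRlt i (hFR i hi))) (List.nodup_nil) (by simp) _ rfl
      set s := F.foldl (fun s i => ((tbl.getD i ([], 0)).1).foldl (nsga2StepA f) s)
        (dc, rankA, ([] : List Nat)) with hs
      set frontB := R.filter (fun i => !(R.any (fun j =>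
        pyDominates (objectives.getD j []) (objectives.getD i [])))) with hfbdef
      have hRR' : R.filter (fun i => !(frontB.contains i))
          = R.filter (fun x => !(F.contains x)) := by
        refine List.filter_congr (fun x hx => ?_)
        have hcc : frontB.contains x = F.contains x := by
          by_cases hxf : x ∈ F
          · rw [List.contains_iff_mem.mpr ((hfb x).mpr hxf), List.contains_iff_mem.mpr hxf]
          · rw [Bool.eq_iff_iff]
            constructor
            · intro hc; exact absurd ((hfb x).mp (List.contains_iff_mem.mp hc)) hxf
            · intro hc; exact absurd (List.contains_iff_mem.mp hc) hxf
        rw [hcc]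
      rw [hRR']
      set R' := R.filter (fun x => !(F.contains x)) with hR'def
      have hsplit : ∀ j, domCnt objectives R j = domCnt objectives F j + domCnt objectives R' j :=
        count_split objectives R F hRnd hFnd hFR
      have hR'mem : ∀ j, j ∈ R' ↔ (j ∈ R ∧ j ∉ F) := by
        intro j
        rw [hR'def, List.mem_filter]
        constructor
        · rintro ⟨h1, h2⟩
          simp only [Bool.not_eq_true'] at h2
          exact ⟨h1, fun hc => by rw [List.contains_iff_mem.mpr hc] at h2; exact absurd h2 (by simp)⟩
        · rintro ⟨h1, h2⟩
          refine ⟨h1, ?_⟩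
          simp only [Bool.not_eq_true']
          rw [Bool.eq_false_iff]
          exact fun hc => h2 (List.contains_iff_mem.mp hc)
      have hiff : ∀ k, (1 ≤ dc.getD k 0 ∧ dc.getD k 0 ≤ (domCnt objectives F k : Int))
          ↔ (k ∈ R' ∧ domCnt objectives R' k = 0) := by
        intro k
        constructor
        · rintro ⟨h1, h2⟩
          have hcf : 1 ≤ domCnt objectives F k := by omega
          obtain ⟨i, hiF, hid⟩ := domCnt_pos_exists hcf
          have hkR : k ∈ R := hcl i (hFR i hiF) k hid
          have hdk := hdcInv k hkR
          have hknF : k ∉ F := by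
            intro hc
            rw [((hF k).mp hc).2] at hdk
            omega
          refine ⟨(hR'mem k).mpr ⟨hkR, hknF⟩, ?_⟩
          have := hsplit k
          omega
        · rintro ⟨h1, h2⟩
          obtain ⟨hkR, hknF⟩ := (hR'mem k).mp h1
          have hdk := hdcInv k hkR
          have hcnz : domCnt objectives R k ≠ 0 := fun hc => hknF ((hF k).mpr ⟨hkR, hc⟩)
          have := hsplit k
          omega
      have hmemF' : ∀ j, j ∈ s.2.2 ↔ (j ∈ R' ∧ domCnt objectives R' j = 0) := by
        intro j
        rw [d6 j]
        constructor
        · rintro (h | h)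
          · exact absurd h (by simp)
          · exact (hiff j).mp h
        · intro h
          exact Or.inr ((hiff j).mpr h)
      have hrkB : ∀ k, (frontB.foldl (fun r i => r.set i (f : Int)) rankB).getD k 0
          = if k ∈ frontB then (f : Int) else rankB.getD k 0 :=
        fun k => foldl_set_getD frontB rankB (f : Int) k
          (fun j hj => by rw [hrbl]; exact hRlt j (List.mem_of_mem_filter hj))
      have hrel' : ∀ k, s.2.1.getD k 0 =
          if k ∈ R' ∧ domCnt objectives R' k = 0 then ((f + 1 : Nat) : Int)
          else (frontB.foldl (fun r i => r.set i (f : Int)) rankB).getD k 0 := by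
        intro k
        rw [d4 k, hrkB k]
        by_cases hc : k ∈ R' ∧ domCnt objectives R' k = 0
        · rw [if_pos ((hiff k).mpr hc), if_pos hc]
          push_cast
          ring
        · rw [if_neg (fun h => hc ((hiff k).mp h)), if_neg hc, hrel k]
          by_cases hcf : k ∈ F
          · rw [if_pos ⟨hFR k hcf, ((hF k).mp hcf).2⟩, if_pos ((hfb k).mpr hcf)]
          · rw [if_neg (fun h => hcf ((hF k).mpr h)), if_neg (fun h => hcf ((hfb k).mp h))]
      have hdcInv' : ∀ j ∈ R', s.1.getD j 0 = (domCnt objectives R' j : Int) := by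
        intro j hj
        obtain ⟨hjR, hjnF⟩ := (hR'mem j).mp hj
        rw [d3 j, hdcInv j hjR]
        have := hsplit j
        omega
      by_cases hR'e : R'.isEmpty = true
      · rw [if_pos hR'e]
        rw [List.isEmpty_iff] at hR'e
        have hF'nil : s.2.2 = [] := by
          rw [List.eq_nil_iff_forall_not_mem]
          intro x hx
          obtain ⟨hx1, -⟩ := (hmemF' x).mp hx
          rw [hR'e] at hx1
          exact absurd hx1 (by simp)
        have hAres : nsga2WhileA tbl (fuel + 1) s.2.2 s.1 s.2.1 (f + 1) = s.2.1 := by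
          rw [whileA_succ, hF'nil, if_pos List.isEmpty_nil]
        rw [hAres]
        refine list_eq_of_getD ?_ (fun k => ?_)
        · rw [d2, foldl_set_len, hrbl]
        · rw [hrel' k, if_neg (fun h => by rw [hR'e] at h; exact absurd h.1 (by simp))]
      · rw [if_neg hR'e]
        have hR'ne : R' ≠ [] := fun h => hR'e (by rw [h]; rfl)
        have hlt : R'.length < R.length := by
          rw [hR'def]
          obtain ⟨x, hx⟩ := List.exists_mem_of_ne_nil F hFne
          refine List.length_filter_lt_length_iff_exists.mpr ⟨x, hFR x hx, ?_⟩
          rw [List.contains_iff_mem.mpr hx]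
          simp
        refine ih R' s.2.2 s.1 s.2.1 (frontB.foldl (fun r i => r.set i (f : Int)) rankB) (f + 1)
          hR'ne (by omega) (hRnd.filter _)
          (fun j hj => hRlt j (List.mem_of_mem_filter hj))
          ?_ d5 hmemF' d1 d2 (by rw [foldl_set_len, hrbl]) hdcInv' hrel'
        intro i hi j hj
        have hiR := List.mem_of_mem_filter hi
        have hjR : j ∈ R := hcl i hiR j hj
        have hpos : 1 ≤ domCnt objectives R j := domCnt_pos_of_mem hiR hj
        refine (hR'mem j).mpr ⟨hjR, fun hc => ?_⟩
        rw [((hF j).mp hc).2] at hpos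
        exact absurd hpos (by simp)

theorem nsga2_sort_py_spec : Claim_equal_nsga2_sort_py := by
  intro objectives _hdom
  show nsga2_sort_py objectives = nsga2_sort_py_alt objectives
  by_cases hn : objectives.length = 0
  · rw [List.length_eq_zero_iff] at hn
    subst hn
    rfl
  · simp only [nsga2_sort_py, nsga2_sort_py_alt]
    have htbl1 : ∀ i, i < objectives.length →
        ((((List.range objectives.length).map (fun i => nsga2InnerA objectives objectives.length i))).getD i ([], 0)).1
          = (List.range objectives.length).filter (fun j => domB objectives i j) := by
      intro i hi
      rw [getD_map_range _ _ hi, innerA_spec]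
    have hdc0 : ∀ j, j < objectives.length →
        ((((List.range objectives.length).map (fun i => nsga2InnerA objectives objectives.length i))).map Prod.snd).getD j 0
          = (domCnt objectives (List.range objectives.length) j : Int) := by
      intro j hj
      rw [List.map_map, getD_map_range _ _ hj]
      show (nsga2InnerA objectives objectives.length j).2 = _
      rw [innerA_spec]
    have hsnd : ∀ i, i < objectives.length →
        ((((List.range objectives.length).map (fun i => nsga2InnerA objectives objectives.length i))).getD i ([], 0)).2
          = (domCnt objectives (List.range objectives.length) i : Int) := by
      intro i hi
      rw [getD_map_range _ _ hi, innerA_spec]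
    refine loop_eq objectives _ htbl1 objectives.length (List.range objectives.length) _ _ _ _ 0
      ?_ ?_ List.nodup_range (fun j hj => List.mem_range.mp hj) ?_
      (List.nodup_range.filter _) ?_ ?_ ?_ ?_ ?_ ?_
    · intro h
      have := congrArg List.length h
      simp at this
      exact hn (by rw [this]; rfl)
    · rw [List.length_range]
    · intro i _ j hj
      exact List.mem_range.mpr (domB_lt hj)
    · intro i
      rw [List.mem_filter]
      constructor
      · rintro ⟨h1, h2⟩
        refine ⟨h1, ?_⟩
        rw [hsnd i (List.mem_range.mp h1)] at h2
        simpa using h2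
      · rintro ⟨h1, h2⟩
        refine ⟨h1, ?_⟩
        rw [hsnd i (List.mem_range.mp h1), h2]
        simp
    · simp
    · rw [foldl_condset_len]
      simp
    · simp
    · intro j hj
      exact hdc0 j (List.mem_range.mp hj)
    · intro k
      rw [foldl_condset_zero _ _ _ (getD_replicate_zero _)]
      split
      · simp
      · rw [getD_replicate_zero]
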